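-- pv_equiv track=rewrite | github.com/moosburger/EnergieAnzeige | Victron/Source/GetOpenWeatherMap.py | get_rain_level_from_weather
-- ===== SOURCE A (Python) =====
-- def get_rain_level_from_weather(weather):
--     rain = False
--     rain_level = 0
--     if len(weather) > 0:
--         for w in weather:
--             if w['icon'] == '09d':
--                 rain = True
--                 rain_level = 1
--             elif w['icon'] == '10d':
--                 rain = True
--                 rain_level = 2
--             elif w['icon'] == '11d':
--                 rain = True
--                 rain_level = 3
--             elif w['icon'] == '13d':
--                 rain = True
--                 rain_level = 4
--
--     return rain, rain_level
-- ===== SOURCE B (Python) =====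
-- _RAIN_CODES = (('09d', 1), ('10d', 2), ('11d', 3), ('13d', 4))
--
-- def get_rain_level_from_weather(weather):
--     # phase 1: index the last position of every icon code
--     last_pos = {}
--     for i, w in enumerate(weather):
--         last_pos[w['icon']] = i
--     # phase 2: among the four rain codes, the one occurring last wins
--     best_i, best = -1, (False, 0)
--     for code, level in _RAIN_CODES:
--         i = last_pos.get(code, -1)
--         if i > best_i:
--             best_i, best = i, (True, level)
--     return best
-- ===== Notes on version B (the rewrite author's own statement) =====
-- stated objective: alternative
-- what changed: Replaces A's forward overwriting if-elif scan by two staged phases: one pass builds a dict of each icon's last position, then an argmax over only the four rain codes picks the level of the latest occurrence.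
import Mathlib
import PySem

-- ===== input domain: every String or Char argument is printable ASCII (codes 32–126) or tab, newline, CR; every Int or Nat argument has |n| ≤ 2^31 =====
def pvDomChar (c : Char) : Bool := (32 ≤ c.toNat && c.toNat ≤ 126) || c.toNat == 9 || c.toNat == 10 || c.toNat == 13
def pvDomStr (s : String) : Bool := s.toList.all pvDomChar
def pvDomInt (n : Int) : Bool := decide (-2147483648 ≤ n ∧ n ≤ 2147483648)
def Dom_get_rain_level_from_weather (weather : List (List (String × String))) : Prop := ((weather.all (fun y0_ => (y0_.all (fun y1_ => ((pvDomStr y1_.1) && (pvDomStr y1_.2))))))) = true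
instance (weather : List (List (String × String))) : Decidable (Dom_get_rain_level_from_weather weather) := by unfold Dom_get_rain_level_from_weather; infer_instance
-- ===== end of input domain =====

-- B replaces A's forward overwriting if-elif scan by two staged phases: a pass
-- that indexes the last position of every icon, then an argmax over the four
-- rain codes. Pre_ excludes elements lacking the 'icon' key (Python A raises
-- KeyError there, and so does B).

-- ===== PORT A =====
def get_rain_level_from_weather (weather : List (List (String × String))) : Bool × Int :=
  if weather.length > 0 then
    weather.foldl (fun (st : Bool × Int) w =>
      let icon := ((PySem.Dict.mk w).get? "icon").getD ""   -- Pre_ guarantees the key is present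
      if icon = "09d" then (true, 1)
      else if icon = "10d" then (true, 2)
      else if icon = "11d" then (true, 3)
      else if icon = "13d" then (true, 4)
      else st) (false, 0)
  else (false, 0)

-- ===== PORT B =====
def rainCodes : List (String × Int) := [("09d", 1), ("10d", 2), ("11d", 3), ("13d", 4)]

-- phase 1 of Source B: dict of each icon's last position
def lastPosOf (weather : List (List (String × String))) : PySem.Dict String Int :=
  (PySem.List.enumerate weather 0).foldl
    (fun (d : PySem.Dict String Int) p =>
      d.insert (((PySem.Dict.mk p.2).get? "icon").getD "") p.1)
    PySem.Dict.empty

-- phase 2 of Source B: argmax over the four rain codes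
def pickBest (d : PySem.Dict String Int) : Bool × Int :=
  (rainCodes.foldl (fun (st : Int × (Bool × Int)) cl =>
      let i := d.getD cl.1 (-1)
      if i > st.1 then (i, (true, cl.2)) else st)
    ((-1 : Int), (false, 0))).2

def get_rain_level_from_weather_alt (weather : List (List (String × String))) : Bool × Int :=
  pickBest (lastPosOf weather)

-- ===== PRECONDITION & SPEC =====
-- Pre_ excludes exactly the inputs where some element has no 'icon' key: Python A raises KeyError there (and so does B).
def Pre_get_rain_level_from_weather (weather : List (List (String × String))) : Prop :=
  ∀ w ∈ weather, ((PySem.Dict.mk w).get? "icon").isSome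
instance (weather : List (List (String × String))) : Decidable (Pre_get_rain_level_from_weather weather) := by unfold Pre_get_rain_level_from_weather; infer_instance
def pvWitness_get_rain_level_from_weather : (List (List (String × String))) := [[("icon", "10d")], [("icon", "01d")]]
def Spec_get_rain_level_from_weather (weather : List (List (String × String))) (out : Bool × Int) : Prop := out = get_rain_level_from_weather_alt weather
instance (weather : List (List (String × String))) (out : Bool × Int) : Decidable (Spec_get_rain_level_from_weather weather out) := by unfold Spec_get_rain_level_from_weather; infer_instance

-- ===== CLAIM (what is proved, stated in full; the proofs are below) =====
def Claim_equal_get_rain_level_from_weather : Prop := ∀ (weather : List (List (String × String))), Dom_get_rain_level_from_weather weather → Pre_get_rain_level_from_weather weather → Spec_get_rain_level_from_weather weather (get_rain_level_from_weather weather)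

-- ===== LEMMAS AND PROOFS =====

def iconOf (w : List (String × String)) : String :=
  ((PySem.Dict.mk w).get? "icon").getD ""

def codeLevel (c : String) : Option Int :=
  if c = "09d" then some 1
  else if c = "10d" then some 2
  else if c = "11d" then some 3
  else if c = "13d" then some 4
  else none

-- reference: first match of the REVERSED list (i.e. last match of the list)
def refFind : List (List (String × String)) → Option (Bool × Int)
  | [] => none
  | w :: ws =>
    match codeLevel (iconOf w) with
    | some l => some (true, l)
    | none => refFind ws

-- the step function of A's fold
def rainStep (st : Bool × Int) (w : List (String × String)) : Bool × Int :=
  let icon := ((PySem.Dict.mk w).get? "icon").getD ""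
  if icon = "09d" then (true, 1)
  else if icon = "10d" then (true, 2)
  else if icon = "11d" then (true, 3)
  else if icon = "13d" then (true, 4)
  else st

lemma refFind_append (l1 l2 : List (List (String × String))) :
    refFind (l1 ++ l2) = (refFind l1).or (refFind l2) := by
  induction l1 with
  | nil => rfl
  | cons w ws ih =>
    simp only [List.cons_append, refFind]
    cases codeLevel (iconOf w) <;> simp [ih]

lemma rainStep_eq_find_single (st : Bool × Int) (w : List (String × String)) :
    rainStep st w = (refFind [w]).getD st := by
  simp only [rainStep, refFind, codeLevel, iconOf]
  split_ifs <;> simp_all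

lemma foldl_rainStep_eq (l : List (List (String × String))) (st : Bool × Int) :
    l.foldl rainStep st = (refFind l.reverse).getD st := by
  induction l generalizing st with
  | nil => rfl
  | cons w ws ih =>
    simp only [List.foldl_cons, List.reverse_cons, refFind_append, ih]
    cases h : refFind ws.reverse with
    | some x => simp
    | none => simp [rainStep_eq_find_single]

-- A's characterization
lemma portA_eq_refFind (weather : List (List (String × String))) :
    get_rain_level_from_weather weather = (refFind weather.reverse).getD (false, 0) := by
  unfold get_rain_level_from_weather
  split_ifs with hl
  · exact foldl_rainStep_eq weather (false, 0)
  · cases weather with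
    | nil => rfl
    | cons w ws => simp at hl

-- B side --------------------------------------------------------------

lemma lastPosOf_append_singleton (ws : List (List (String × String))) (w : List (String × String)) :
    lastPosOf (ws ++ [w]) = (lastPosOf ws).insert (iconOf w) (ws.length : Int) := by
  unfold lastPosOf
  rw [PySem.List.enumerate_append, List.foldl_append]
  simp [PySem.List.enumerate, iconOf]

lemma lastPosOf_bound (ws : List (List (String × String))) :
    ∀ c i, (lastPosOf ws).get? c = some i → 0 ≤ i ∧ i < (ws.length : Int) := by
  induction ws using List.reverseRecOn with
  | nil =>
    intro c i h
    simp [lastPosOf, PySem.List.enumerate, PySem.Dict.get?_empty] at h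
  | append_singleton ws w ih =>
    intro c i h
    rw [lastPosOf_append_singleton, PySem.Dict.get?_insert] at h
    by_cases hc : c = iconOf w
    · simp [hc] at h
      subst h
      simp only [List.length_append, List.length_cons, List.length_nil]
      push_cast
      omega
    · rw [if_neg hc] at h
      have := ih c i h
      simp only [List.length_append, List.length_cons, List.length_nil] at *
      push_cast at *
      omega

lemma pickBest_insert_nonmatch (d : PySem.Dict String Int) (c : String) (n : Int)
    (h : codeLevel c = none) : pickBest (d.insert c n) = pickBest d := by
  have h9 : c ≠ "09d" := by intro e; simp [codeLevel, e] at h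
  have h10 : c ≠ "10d" := by intro e; simp [codeLevel, e] at h
  have h11 : c ≠ "11d" := by intro e; simp [codeLevel, e] at h
  have h13 : c ≠ "13d" := by intro e; simp [codeLevel, e] at h
  unfold pickBest rainCodes
  simp only [List.foldl, PySem.Dict.getD_insert]
  rw [if_neg (Ne.symm h9), if_neg (Ne.symm h10), if_neg (Ne.symm h11), if_neg (Ne.symm h13)]

lemma pickBest_insert_match (d : PySem.Dict String Int) (c : String) (n : Int) (l : Int)
    (h : codeLevel c = some l) (hn : (0 : Int) ≤ n)
    (hb : ∀ c' i, d.get? c' = some i → i < n) :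
    pickBest (d.insert c n) = (true, l) := by
  have hlt : ∀ c', c' ≠ c → (d.insert c n).getD c' (-1) < n := by
    intro c' hne
    rw [PySem.Dict.getD_insert, if_neg hne, PySem.Dict.getD_eq_get?_getD]
    rcases hg : d.get? c' with _ | i
    · simp; omega
    · simpa using hb _ _ hg
  have hself : (d.insert c n).getD c (-1) = n := by
    rw [PySem.Dict.getD_insert, if_pos rfl]
  unfold pickBest rainCodes
  simp only [List.foldl]
  by_cases h1 : c = "09d"
  · subst h1
    simp [codeLevel] at h; subst h
    have a10 := hlt "10d" (by decide)
    have a11 := hlt "11d" (by decide)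
    have a13 := hlt "13d" (by decide)
    rw [hself]
    split_ifs <;> first | rfl | (exfalso; omega)
  by_cases h2 : c = "10d"
  · subst h2
    simp [codeLevel] at h; subst h
    have a09 := hlt "09d" (by decide)
    have a11 := hlt "11d" (by decide)
    have a13 := hlt "13d" (by decide)
    rw [hself]
    split_ifs <;> first | rfl | (exfalso; omega)
  by_cases h3 : c = "11d"
  · subst h3
    simp [codeLevel] at h; subst h
    have a09 := hlt "09d" (by decide)
    have a10 := hlt "10d" (by decide)
    have a13 := hlt "13d" (by decide)
    rw [hself]
    split_ifs <;> first | rfl | (exfalso; omega)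
  by_cases h4 : c = "13d"
  · subst h4
    simp [codeLevel] at h; subst h
    have a09 := hlt "09d" (by decide)
    have a10 := hlt "10d" (by decide)
    have a11 := hlt "11d" (by decide)
    rw [hself]
    split_ifs <;> first | rfl | (exfalso; omega)
  · simp [codeLevel, h1, h2, h3, h4] at h

lemma portB_eq_refFind (weather : List (List (String × String))) :
    get_rain_level_from_weather_alt weather = (refFind weather.reverse).getD (false, 0) := by
  unfold get_rain_level_from_weather_alt
  induction weather using List.reverseRecOn with
  | nil => rfl
  | append_singleton ws w ih =>
    rw [lastPosOf_append_singleton, List.reverse_append]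
    rcases hc : codeLevel (iconOf w) with _ | l
    · rw [pickBest_insert_nonmatch _ _ _ hc, ih]
      simp [refFind, hc]
    · rw [pickBest_insert_match _ _ _ _ hc (by positivity)
        (fun c' i hg => ((lastPosOf_bound ws c' i hg).2))]
      simp [refFind, hc]

-- ===== VERDICT (by name: the statement is the Claim_ definition above) =====
theorem get_rain_level_from_weather_spec : Claim_equal_get_rain_level_from_weather := by
  intro weather _ _
  unfold Spec_get_rain_level_from_weather
  rw [portA_eq_refFind, portB_eq_refFind]
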